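-- pv_equiv track=rewrite | github.com/yz4004/codeforce-python | daily/problem_list/2025/1127.py | check
-- ===== SOURCE A (Python) =====
-- from functools import cache
--
-- MOD = 998244353
--
-- def check(R,k):
--     s = [int(c) for c in str(R)]
--     m = len(s)
--
--     tens = [1]*(m+1)
--     for i in range(1,m+1):
--         tens[i] = tens[i-1]*10
--
--     @cache
--     def f(i, is_num, is_limit, mask):
--         if i == m:
--             return [1,0] if mask.bit_count() <= k else [0,0] # 注意是至多k个
--
--         res = [0,0]
--         if not is_num:
--             res = f(i+1, False, False, 0)
--
--         lo = 1 if not is_num else 0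
--         hi = 9 if not is_limit else s[i]
--
--         for j in range(lo, hi+1):
--             cnt, sm = f(i+1, True, is_limit and j == hi, mask | (1<<j))
--             res[0] += cnt
--             res[1] = (res[1] + sm + cnt * j * tens[m-1-i]) % MOD
--         return res
--
--     cnt, sm = f(0, False, True, 0)
--     return sm
-- ===== SOURCE B (Python) =====
-- MOD = 998244353
--
-- def check(R, k):
--     s = [ord(c) - 48 for c in str(R)]
--     m = len(s)
--     # free[L][mask]: (count, positional digit-sum mod MOD) over all length-L free
--     # suffixes whose accumulated distinct-digit mask ends with popcount <= k
--     free = [[(1, 0) if bin(mask).count('1') <= k else (0, 0) for mask in range(1024)]]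
--     # skip[L]: same, for the 'number not yet started' state with L positions left
--     skip = [free[0][0]]
--     t = 1
--     for L in range(1, m + 1):
--         prev = free[L - 1]
--         layer = []
--         for mask in range(1024):
--             c = 0
--             sm = 0
--             for j in range(10):
--                 pc, ps = prev[mask | (1 << j)]
--                 c += pc
--                 sm = (sm + ps + pc * j * t) % MOD
--             layer.append((c, sm))
--         free.append(layer)
--         hc, hs = skip[L - 1]
--         for j in range(1, 10):
--             pc, ps = prev[1 << j]
--             hc += pc
--             hs = (hs + ps + pc * j * t) % MOD
--         skip.append((hc, hs))
--         t *= 10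
--     # single forward pass along the digits of R (the tight prefix)
--     ans = 0
--     mask = 0
--     started = False
--     P = 0  # value contributed by the consumed prefix digits
--     t = 10 ** m
--     for i in range(m):
--         d = s[i]
--         L = m - 1 - i
--         t //= 10
--         if not started:
--             ans = (ans + skip[L][1]) % MOD
--         lo = 0 if started else 1
--         for j in range(lo, d):
--             pc, ps = free[L][mask | (1 << j)]
--             ans = (ans + ps + pc * ((j * t + P) % MOD)) % MOD
--         if d < lo:
--             return ans
--         mask |= 1 << d
--         started = True
--         P += d * t
--     if bin(mask).count('1') <= k:
--         ans = (ans + P) % MOD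
--     return ans
-- ===== Notes on version B (the rewrite author's own statement) =====
-- stated objective: alternative
-- what changed: A's cached top-down digit-DP recursion is replaced by an iterative bottom-up DP: B precomputes suffix tables free[L][mask]/skip[L] by length and then makes a single forward pass over R's digits, carrying the prefix value; no recursion and no memo cache.
import Mathlib
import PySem

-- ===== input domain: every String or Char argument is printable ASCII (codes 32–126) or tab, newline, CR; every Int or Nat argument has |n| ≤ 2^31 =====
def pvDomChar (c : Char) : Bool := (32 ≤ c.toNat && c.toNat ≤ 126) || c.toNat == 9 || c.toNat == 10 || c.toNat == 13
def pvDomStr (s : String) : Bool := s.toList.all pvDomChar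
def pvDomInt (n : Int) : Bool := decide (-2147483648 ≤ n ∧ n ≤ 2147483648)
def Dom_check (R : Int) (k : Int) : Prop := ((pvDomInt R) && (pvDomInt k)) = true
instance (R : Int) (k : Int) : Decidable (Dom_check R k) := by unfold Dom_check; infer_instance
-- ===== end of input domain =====

-- B replaces A's cached top-down digit-DP recursion by an iterative bottom-up table DP
-- plus one forward pass over the digits (objective: alternative; same asymptotic cost).

def pvMOD : Int := 998244353

-- 10^n; A maintains this as the list `tens` (tens[i] = tens[i-1]*10), indexed as tens[m-1-i]
def pow10 : Nat → Int
  | 0 => 1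
  | n + 1 => 10 * pow10 n

-- ===== PORT A =====
-- injective encoding of @cache's key tuple (i, is_num, is_limit, mask); i is carried as the
-- length of the remaining digit suffix (the suffix of s is determined by its length)
def encKey (n : Nat) (b l : Bool) (mask : Nat) : Nat :=
  Nat.pair (Nat.pair n mask) ((cond b 1 0) + 2 * (cond l 1 0))

-- A's inner f with its @cache, threaded explicitly as a hash map (lookup first, insert on return)
def checkMemo (k : Int) :
    List Nat → Bool → Bool → Nat → Std.HashMap Nat (Int × Int) →
      (Int × Int) × Std.HashMap Nat (Int × Int)
  | rem, is_num, is_limit, mask, memo =>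
    match memo[encKey rem.length is_num is_limit mask]? with
    | some v => (v, memo)
    | none =>
      let rm : (Int × Int) × Std.HashMap Nat (Int × Int) :=
        match rem with
        | [] =>
          (if (PySem.Int.bitCount (mask : Int) : Int) ≤ k then ((1 : Int), (0 : Int)) else (0, 0),
           memo)
        | _ :: rest =>
          let rm0 := if is_num then (((0 : Int), (0 : Int)), memo)
                     else checkMemo k rest false false 0 memo
          let lo : Nat := if is_num then 0 else 1
          let hi : Nat := if is_limit then rem.head! else 9
          (List.range' lo (hi + 1 - lo)).foldl
            (fun acc j =>
              let cm := checkMemo k rest true (is_limit && (j == hi)) (mask ||| (1 <<< j)) acc.2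
              ((acc.1.1 + cm.1.1,
                PySem.Int.mod (acc.1.2 + cm.1.2 + cm.1.1 * (j : Int) * pow10 rest.length) pvMOD),
               cm.2))
            rm0
      (rm.1, rm.2.insert (encKey rem.length is_num is_limit mask) rm.1)

def check (R : Int) (k : Int) : Int :=
  -- s = [int(c) for c in str(R)]; int(c) = ord(c) - 48, exact on the digit chars str(R) yields for R ≥ 0 (Pre_)
  let s : List Nat := (PySem.Int.toChars R).map (fun c => c.toNat - 48)
  ((checkMemo k s false true 0 ∅).1).2

-- ===== PORT B =====
-- free[0][mask]: base layer, (1,0) iff mask has at most k distinct digits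
def bBase (k : Int) : Array (Int × Int) :=
  (Array.range 1024).map (fun (mask : Nat) =>
    if (PySem.Int.bitCount (mask : Int) : Int) ≤ k then ((1 : Int), (0 : Int)) else (0, 0))

-- builds free[0..m], skip[0..m] and t = 10^m, appending one layer per length (Source B's build loop)
def bBuild (k : Int) : Nat → Array (Array (Int × Int)) × Array (Int × Int) × Int
  | 0 => (#[bBase k], #[(bBase k).getD 0 (0, 0)], 1)
  | L + 1 =>
    let fst := bBuild k L
    let free := fst.1
    let skip := fst.2.1
    let t := fst.2.2
    let prev := free.getD L #[]
    let layer := (Array.range 1024).map (fun mask =>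
      (List.range 10).foldl (fun cs j =>
        let p := prev.getD (mask ||| (1 <<< j)) (0, 0)
        (cs.1 + p.1, PySem.Int.mod (cs.2 + p.2 + p.1 * (j : Int) * t) pvMOD))
        ((0 : Int), (0 : Int)))
    let h := (List.range' 1 9).foldl (fun h j =>
        let p := prev.getD (1 <<< j) (0, 0)
        (h.1 + p.1, PySem.Int.mod (h.2 + p.2 + p.1 * (j : Int) * t) pvMOD))
      (skip.getD L (0, 0))
    (free.push layer, skip.push h, t * 10)

-- Source B's forward pass over the digits of R (t //= 10 each step; P = value of the consumed prefix)
def bWalk (k : Int) (free : Array (Array (Int × Int))) (skip : Array (Int × Int)) :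
    List Nat → Int → Bool → Nat → Int → Int → Int
  | [], _, _, mask, P, ans =>
    if (PySem.Int.bitCount (mask : Int) : Int) ≤ k then PySem.Int.mod (ans + P) pvMOD else ans
  | d :: rest, t, started, mask, P, ans =>
    let t := PySem.Int.floordiv t 10
    let L := rest.length
    let ans := if started then ans else PySem.Int.mod (ans + (skip.getD L (0, 0)).2) pvMOD
    let lo : Nat := if started then 0 else 1
    let ans := (List.range' lo (d - lo)).foldl (fun ans j =>
        let p := (free.getD L #[]).getD (mask ||| (1 <<< j)) (0, 0)
        PySem.Int.mod (ans + p.2 + p.1 * (PySem.Int.mod ((j : Int) * t + P) pvMOD)) pvMOD) ans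
    if d < lo then ans
    else bWalk k free skip rest t true (mask ||| (1 <<< d)) (P + (d : Int) * t) ans

def check_alt (R : Int) (k : Int) : Int :=
  -- s = [ord(c) - 48 for c in str(R)]
  let s : List Nat := (PySem.Int.toChars R).map (fun c => c.toNat - 48)
  let ft := bBuild k s.length
  -- ft.2.2 = 10^m, the initial t of Source B's forward loop
  bWalk k ft.1 ft.2.1 s ft.2.2 false 0 0 0

-- ===== PRECONDITION & SPEC =====
-- Pre_ excludes R < 0, where A raises ValueError (int('-') on the sign character of str(R)).
def Pre_check (R : Int) (k : Int) : Prop := 0 ≤ R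
instance (R : Int) (k : Int) : Decidable (Pre_check R k) := by unfold Pre_check; infer_instance
def pvWitness_check : Int × Int := (2025, 2)

def Spec_check (R : Int) (k : Int) (out : Int) : Prop := out = check_alt R k
instance (R : Int) (k : Int) (out : Int) : Decidable (Spec_check R k out) := by
  unfold Spec_check; infer_instance

-- ===== CLAIM (what is proved, stated in full; the proofs are below) =====
def Claim_equal_check : Prop :=
  ∀ (R : Int) (k : Int), Dom_check R k → Pre_check R k → Spec_check R k (check R k)

-- ===== LEMMAS AND PROOFS =====

-- the uncached recursion that A's cached f computes
def pureF (k : Int) : List Nat → Bool → Bool → Nat → Int × Int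
  | [], _, _, mask =>
    if (PySem.Int.bitCount (mask : Int) : Int) ≤ k then ((1 : Int), (0 : Int)) else (0, 0)
  | d :: rest, is_num, is_limit, mask =>
    let r0 := if is_num then ((0 : Int), (0 : Int)) else pureF k rest false false 0
    let lo : Nat := if is_num then 0 else 1
    let hi : Nat := if is_limit then d else 9
    (List.range' lo (hi + 1 - lo)).foldl
      (fun r j =>
        let cs := pureF k rest true (is_limit && (j == hi)) (mask ||| (1 <<< j))
        (r.1 + cs.1, PySem.Int.mod (r.2 + cs.2 + cs.1 * (j : Int) * pow10 rest.length) pvMOD))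
      r0

theorem encKey_inj {n n' : Nat} {b b' l l' : Bool} {mask mask' : Nat}
    (h : encKey n b l mask = encKey n' b' l' mask') :
    n = n' ∧ b = b' ∧ l = l' ∧ mask = mask' := by
  unfold encKey at h
  rw [Nat.pair_eq_pair] at h
  obtain ⟨h1, h2⟩ := h
  rw [Nat.pair_eq_pair] at h1
  cases b <;> cases b' <;> cases l <;> cases l' <;> simp_all

-- memo invariant: every cached entry is the pure value of the unique suffix of s of that length
def MGood (k : Int) (s : List Nat) (memo : Std.HashMap Nat (Int × Int)) : Prop :=
  ∀ (n : Nat) (b l : Bool) (mask : Nat) (v : Int × Int), n ≤ s.length →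
    memo[encKey n b l mask]? = some v → v = pureF k (s.drop (s.length - n)) b l mask

theorem suffix_drop {s rem : List Nat} (h : rem <:+ s) :
    s.drop (s.length - rem.length) = rem := by
  obtain ⟨t, rfl⟩ := h
  have hl : (t ++ rem).length - rem.length = t.length := by simp
  rw [hl, List.drop_left]

theorem mgood_insert (k : Int) (s rem : List Nat) (hsfx : rem <:+ s) (b l : Bool)
    (mask : Nat) (memo : Std.HashMap Nat (Int × Int)) (hg : MGood k s memo) :
    MGood k s (memo.insert (encKey rem.length b l mask) (pureF k rem b l mask)) := by
  intro n' b' l' mask' v hn hlook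
  rw [Std.HashMap.getElem?_insert] at hlook
  simp only [beq_iff_eq] at hlook
  split at hlook
  · next he =>
    obtain ⟨h1, h2, h3, h4⟩ := encKey_inj he
    subst h1; subst h2; subst h3; subst h4
    rw [suffix_drop hsfx]
    exact (Option.some.inj hlook).symm
  · exact hg n' b' l' mask' v hn hlook

theorem fold_step_good (k : Int) (s rest : List Nat)
    (hrest : ∀ (b l : Bool) (mask : Nat) (memo : Std.HashMap Nat (Int × Int)), MGood k s memo →
      (checkMemo k rest b l mask memo).1 = pureF k rest b l mask ∧
      MGood k s (checkMemo k rest b l mask memo).2)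
    (il : Bool) (hi mask : Nat) :
    ∀ (js : List Nat) (p : (Int × Int) × Std.HashMap Nat (Int × Int)), MGood k s p.2 →
      (js.foldl (fun acc j =>
          let cm := checkMemo k rest true (il && (j == hi)) (mask ||| (1 <<< j)) acc.2
          ((acc.1.1 + cm.1.1,
            PySem.Int.mod (acc.1.2 + cm.1.2 + cm.1.1 * (j : Int) * pow10 rest.length) pvMOD),
           cm.2)) p).1
        = js.foldl (fun r j =>
            let cs := pureF k rest true (il && (j == hi)) (mask ||| (1 <<< j))
            (r.1 + cs.1,
             PySem.Int.mod (r.2 + cs.2 + cs.1 * (j : Int) * pow10 rest.length) pvMOD)) p.1 ∧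
      MGood k s (js.foldl (fun acc j =>
          let cm := checkMemo k rest true (il && (j == hi)) (mask ||| (1 <<< j)) acc.2
          ((acc.1.1 + cm.1.1,
            PySem.Int.mod (acc.1.2 + cm.1.2 + cm.1.1 * (j : Int) * pow10 rest.length) pvMOD),
           cm.2)) p).2 := by
  intro js
  induction js with
  | nil => intro p hp; exact ⟨rfl, hp⟩
  | cons j js ih =>
    intro p hp
    obtain ⟨h1, h2⟩ := hrest true (il && (j == hi)) (mask ||| (1 <<< j)) p.2 hp
    simp only [List.foldl_cons]
    rw [h1]
    exact ih ⟨_, (checkMemo k rest true (il && (j == hi)) (mask ||| (1 <<< j)) p.2).2⟩ h2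

theorem checkMemo_good (k : Int) (s : List Nat) :
    ∀ (rem : List Nat), rem <:+ s →
    ∀ (b l : Bool) (mask : Nat) (memo : Std.HashMap Nat (Int × Int)), MGood k s memo →
      (checkMemo k rem b l mask memo).1 = pureF k rem b l mask ∧
      MGood k s (checkMemo k rem b l mask memo).2 := by
  intro rem
  induction rem with
  | nil =>
    intro hsfx b l mask memo hg
    unfold checkMemo
    cases hmem : memo[encKey (List.length ([] : List Nat)) b l mask]? with
    | some v =>
      refine ⟨?_, hg⟩
      have := hg ([] : List Nat).length b l mask v (Nat.zero_le _) hmem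
      simpa [List.drop_length] using this
    | none =>
      refine ⟨rfl, ?_⟩
      have := mgood_insert k s [] hsfx b l mask memo hg
      simpa [pureF] using this
  | cons d rest ih =>
    intro hsfx b l mask memo hg
    have hsfx' : rest <:+ s := (List.suffix_cons d rest).trans hsfx
    have hrest : ∀ (b l : Bool) (mask : Nat) (memo : Std.HashMap Nat (Int × Int)),
        MGood k s memo →
        (checkMemo k rest b l mask memo).1 = pureF k rest b l mask ∧
        MGood k s (checkMemo k rest b l mask memo).2 :=
      fun b l mask memo hm => ih hsfx' b l mask memo hm
    unfold checkMemo
    cases hmem : memo[encKey (d :: rest).length b l mask]? with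
    | some v =>
      refine ⟨?_, hg⟩
      have := hg (d :: rest).length b l mask v hsfx.length_le hmem
      rwa [suffix_drop hsfx] at this
    | none =>
      simp only [List.head!_cons]
      have h01 : (if b = true then (((0 : Int), (0 : Int)), memo)
            else checkMemo k rest false false 0 memo).1
          = (if b = true then ((0 : Int), (0 : Int)) else pureF k rest false false 0) := by
        cases b
        · simpa using (hrest false false 0 memo hg).1
        · simp
      have h02 : MGood k s ((if b = true then (((0 : Int), (0 : Int)), memo)
          else checkMemo k rest false false 0 memo).2) := by
        cases b
        · simpa using (hrest false false 0 memo hg).2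
        · simpa using hg
      obtain ⟨hf1, hf2⟩ := fold_step_good k s rest hrest l (if l = true then d else 9) mask
        (List.range' (if b = true then 0 else 1)
          ((if l = true then d else 9) + 1 - if b = true then 0 else 1)) _ h02
      have hpf : pureF k (d :: rest) b l mask
          = (List.range' (if b = true then 0 else 1)
              ((if l = true then d else 9) + 1 - if b = true then 0 else 1)).foldl
              (fun r j =>
                (r.1 + (pureF k rest true (l && (j == if l = true then d else 9))
                    (mask ||| (1 <<< j))).1,
                 PySem.Int.mod (r.2 + (pureF k rest true (l && (j == if l = true then d else 9))
                      (mask ||| (1 <<< j))).2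
                    + (pureF k rest true (l && (j == if l = true then d else 9))
                      (mask ||| (1 <<< j))).1 * (j : Int) * pow10 rest.length) pvMOD))
              (if b = true then ((0 : Int), (0 : Int)) else pureF k rest false false 0) := by
        conv_lhs => rw [pureF]
      refine ⟨?_, ?_⟩
      · rw [hf1, h01, ← hpf]
      · rw [hf1, h01, ← hpf]
        exact mgood_insert k s (d :: rest) hsfx b l mask _ hf2

theorem mgood_empty (k : Int) (s : List Nat) : MGood k s (∅ : Std.HashMap Nat (Int × Int)) := by
  intro n b l mask v _ hv
  simp at hv

theorem check_eq_pure (R k : Int) :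
    check R k = (pureF k ((PySem.Int.toChars R).map (fun c => c.toNat - 48)) false true 0).2 := by
  show (checkMemo k ((PySem.Int.toChars R).map (fun c => c.toNat - 48)) false true 0 ∅).1.2 = _
  rw [(checkMemo_good k _ _ (List.suffix_refl _) false true 0 ∅ (mgood_empty k _)).1]

theorem pvmod_eq (a : Int) : PySem.Int.mod a pvMOD = a % pvMOD :=
  PySem.Int.mod_eq_emod_of_pos (by norm_num [pvMOD])

theorem emod_reduced (a : Int) : a % pvMOD % pvMOD = a % pvMOD :=
  Int.emod_emod_of_dvd _ dvd_rfl

theorem foldl_snd_reduced (l : List Nat) (g : Int × Int → Nat → Int × Int)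
    (hg : ∀ r j, ((g r j).2) % pvMOD = (g r j).2) (r0 : Int × Int)
    (h0 : r0.2 % pvMOD = r0.2) : (l.foldl g r0).2 % pvMOD = (l.foldl g r0).2 := by
  induction l generalizing r0 with
  | nil => exact h0
  | cons x xs ih => exact ih (g r0 x) (hg r0 x)

-- (pureF …).2 is always reduced mod pvMOD
theorem pureF_snd_reduced (k : Int) (rem : List Nat) (b l : Bool) (mask : Nat) :
    (pureF k rem b l mask).2 % pvMOD = (pureF k rem b l mask).2 := by
  induction rem generalizing b l mask with
  | nil => unfold pureF; split <;> simp
  | cons d rest ih =>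
    unfold pureF
    apply foldl_snd_reduced
    · intro r j; simp only [pvmod_eq]; exact emod_reduced _
    · cases b with
      | false => simpa using ih false false 0
      | true => simp

-- bottom-up tables: value of a free suffix of length L / of the not-yet-started state
def freeT (k : Int) : Nat → Nat → Int × Int
  | 0, mask =>
    if (PySem.Int.bitCount (mask : Int) : Int) ≤ k then ((1 : Int), (0 : Int)) else (0, 0)
  | L + 1, mask =>
    (List.range 10).foldl
      (fun r j =>
        let cs := freeT k L (mask ||| (1 <<< j))
        (r.1 + cs.1, PySem.Int.mod (r.2 + cs.2 + cs.1 * (j : Int) * pow10 L) pvMOD))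
      ((0 : Int), (0 : Int))

def skipT (k : Int) : Nat → Int × Int
  | 0 => if (PySem.Int.bitCount ((0 : Nat) : Int) : Int) ≤ k then ((1 : Int), (0 : Int)) else (0, 0)
  | L + 1 =>
    (List.range' 1 9).foldl
      (fun r j =>
        let cs := freeT k L ((0 : Nat) ||| (1 <<< j))
        (r.1 + cs.1, PySem.Int.mod (r.2 + cs.2 + cs.1 * (j : Int) * pow10 L) pvMOD))
      (skipT k L)

theorem pureF_free (k : Int) (rem : List Nat) (mask : Nat) :
    pureF k rem true false mask = freeT k rem.length mask := by
  induction rem generalizing mask with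
  | nil => rfl
  | cons d rest ih =>
    unfold pureF freeT
    simp only [List.length_cons, if_true, Bool.false_and, List.range_eq_range']
    apply PySem.List.foldl_congr_mem
    intro acc j _
    rw [ih]

theorem pureF_skip (k : Int) (rem : List Nat) :
    pureF k rem false false 0 = skipT k rem.length := by
  induction rem with
  | nil => rfl
  | cons d rest ih =>
    unfold pureF skipT
    simp only [List.length_cons, Bool.false_and, ih]
    apply PySem.List.foldl_congr_mem
    intro acc j _
    rw [pureF_free]

theorem getD_range_map {α : Type} (n : Nat) (f : Nat → α) (i : Nat) (d : α) (h : i < n) :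
    ((Array.range n).map f).getD i d = f i := by
  rw [Array.getD_eq_getD_getElem?, Array.getElem?_map]
  simp [h]

theorem getD_push {α : Type} (a : Array α) (x : α) (i : Nat) (d : α) :
    (a.push x).getD i d = if i = a.size then x else a.getD i d := by
  rw [Array.getD_eq_getD_getElem?, Array.getElem?_push]
  split
  · rfl
  · rw [← Array.getD_eq_getD_getElem?]

theorem shiftLeft_lt_1024 {j : Nat} (hj : j < 10) : 1 <<< j < 1024 := by
  have h1 : (1 <<< j) = 2 ^ j := by simp [Nat.shiftLeft_eq]
  have h2 : 2 ^ j ≤ 2 ^ 9 := Nat.pow_le_pow_right (by norm_num) (by omega)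
  omega

theorem or_lt_1024 {mask j : Nat} (hm : mask < 1024) (hj : j < 10) :
    mask ||| (1 <<< j) < 1024 := by
  have h1 : mask < 2 ^ 10 := by norm_num; omega
  have h2 : 1 <<< j < 2 ^ 10 := by have := shiftLeft_lt_1024 hj; norm_num; omega
  have := Nat.or_lt_two_pow h1 h2
  norm_num at this; omega

theorem bBuild_spec (k : Int) (m : Nat) :
    (bBuild k m).1.size = m + 1 ∧ (bBuild k m).2.1.size = m + 1 ∧
    (bBuild k m).2.2 = pow10 m ∧
    (∀ L, L ≤ m → (bBuild k m).2.1.getD L (0, 0) = skipT k L) ∧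
    (∀ L, L ≤ m → ∀ mask, mask < 1024 →
      ((bBuild k m).1.getD L #[]).getD mask (0, 0) = freeT k L mask) := by
  induction m with
  | zero =>
    refine ⟨rfl, rfl, rfl, ?_, ?_⟩
    · intro L hL
      interval_cases L
      show (bBase k).getD 0 (0, 0) = skipT k 0
      unfold bBase
      rw [getD_range_map 1024 _ 0 _ (by norm_num)]
      rfl
    · intro L hL mask hm
      interval_cases L
      show (bBase k).getD mask (0, 0) = freeT k 0 mask
      unfold bBase
      rw [getD_range_map 1024 _ mask _ hm]
      rfl
  | succ m IH =>
    obtain ⟨hs1, hs2, ht, hskip, hfree⟩ := IH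
    have hprev : ∀ mask, mask < 1024 →
        ((bBuild k m).1.getD m #[]).getD mask (0, 0) = freeT k m mask :=
      fun mask h => hfree m le_rfl mask h
    simp only [bBuild]
    refine ⟨by simp [hs1], by simp [hs2], ?_, ?_, ?_⟩
    · rw [ht]; simp [pow10]; ring
    · intro L hL
      rw [getD_push, hs2]
      by_cases hLm : L = m + 1
      · subst hLm
        rw [if_pos rfl, hskip m le_rfl]
        conv_rhs => rw [skipT]
        apply PySem.List.foldl_congr_mem
        intro acc j hj
        rw [List.mem_range'_1] at hj
        rw [hprev (1 <<< j) (shiftLeft_lt_1024 (by omega)), ht, Nat.zero_or]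
      · rw [if_neg hLm]
        exact hskip L (by omega)
    · intro L hL mask hm
      rw [getD_push, hs1]
      by_cases hLm : L = m + 1
      · subst hLm
        rw [if_pos rfl, getD_range_map 1024 _ mask _ hm]
        conv_rhs => rw [freeT]
        apply PySem.List.foldl_congr_mem
        intro acc j hj
        rw [List.mem_range] at hj
        rw [hprev (mask ||| (1 <<< j)) (or_lt_1024 hm hj), ht]
      · rw [if_neg hLm]
        exact hfree L (by omega) mask hm

theorem emod_addl (a b : Int) : (a % pvMOD + b) % pvMOD = (a + b) % pvMOD :=
  Int.emod_add_emod a pvMOD b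

theorem emod_mulr (a b : Int) : (a * (b % pvMOD)) % pvMOD = (a * b) % pvMOD := by
  conv_rhs => rw [Int.mul_emod]
  rw [Int.mul_emod a (b % pvMOD), emod_reduced]

-- sum characterization of A's inner loop (over free completions)
theorem afold_freeT (k : Int) (L mask : Nat) (T : Int) (js : List Nat) (r0 : Int × Int)
    (h0 : r0.2 % pvMOD = r0.2) :
    js.foldl (fun r j =>
        (r.1 + (freeT k L (mask ||| (1 <<< j))).1,
         PySem.Int.mod (r.2 + (freeT k L (mask ||| (1 <<< j))).2
           + (freeT k L (mask ||| (1 <<< j))).1 * (j : Int) * T) pvMOD)) r0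
      = (r0.1 + (js.map (fun j => (freeT k L (mask ||| (1 <<< j))).1)).sum,
         (r0.2 + (js.map (fun j => (freeT k L (mask ||| (1 <<< j))).2
           + (freeT k L (mask ||| (1 <<< j))).1 * (j : Int) * T)).sum) % pvMOD) := by
  induction js generalizing r0 with
  | nil =>
    simp only [List.foldl_nil, List.map_nil, List.sum_nil, add_zero]
    rw [h0]
  | cons j js ih =>
    rw [List.foldl_cons, ih _ (by rw [pvmod_eq]; exact emod_reduced _)]
    simp only [List.map_cons, List.sum_cons, pvmod_eq]
    rw [Prod.mk.injEq]
    refine ⟨by ring, ?_⟩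
    rw [emod_addl]
    congr 1
    ring

theorem emod_mul_mid (x a y z : Int) :
    (x + a * (y % pvMOD) + z) % pvMOD = (x + a * y + z) % pvMOD := by
  have h1 : x + a * (y % pvMOD) + z = a * (y % pvMOD) + (x + z) := by ring
  have h2 : x + a * y + z = a * y + (x + z) := by ring
  rw [h1, h2, Int.add_emod (a * (y % pvMOD)), emod_mulr, ← Int.add_emod]

-- sum characterization of B's branch loop in the forward pass
theorem bfold_freeT (k : Int) (L mask : Nat) (t P : Int) (js : List Nat) (ans0 : Int)
    (h0 : ans0 % pvMOD = ans0) :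
    js.foldl (fun ans j =>
        PySem.Int.mod (ans + (freeT k L (mask ||| (1 <<< j))).2
          + (freeT k L (mask ||| (1 <<< j))).1
            * (PySem.Int.mod ((j : Int) * t + P) pvMOD)) pvMOD) ans0
      = (ans0 + (js.map (fun j => (freeT k L (mask ||| (1 <<< j))).2
          + (freeT k L (mask ||| (1 <<< j))).1 * ((j : Int) * t + P))).sum) % pvMOD := by
  induction js generalizing ans0 with
  | nil =>
    simp only [List.foldl_nil, List.map_nil, List.sum_nil, add_zero]
    rw [h0]
  | cons j js ih =>
    rw [List.foldl_cons, ih _ (by rw [pvmod_eq]; exact emod_reduced _)]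
    simp only [List.map_cons, List.sum_cons, pvmod_eq]
    rw [emod_addl, emod_mul_mid]
    congr 1
    ring

-- splitting the per-branch sum into positional part and prefix part
theorem sum_split (js : List Nat) (f g : Nat → Int) (t P : Int) :
    (js.map (fun j => f j + g j * ((j : Int) * t + P))).sum
      = (js.map (fun j => f j + g j * (j : Int) * t)).sum + (js.map g).sum * P := by
  induction js with
  | nil => simp
  | cons j js ih =>
    simp only [List.map_cons, List.sum_cons, ih]
    ring

theorem skipT_snd_reduced (k : Int) (L : Nat) : (skipT k L).2 % pvMOD = (skipT k L).2 := by
  have h := pureF_snd_reduced k (List.replicate L 0) false false 0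
  rwa [pureF_skip, List.length_replicate] at h

-- A's limit-position recursion, split into the branch sum plus the continued limit call
theorem pureF_limit_split (k : Int) (d : Nat) (rest : List Nat) (s0 : Bool) (mask : Nat)
    (hd : (if s0 = true then 0 else 1) ≤ d) :
    pureF k (d :: rest) s0 true mask
      = ((if s0 = true then ((0 : Int), (0 : Int)) else skipT k rest.length).1
          + ((List.range' (if s0 = true then 0 else 1) (d - if s0 = true then 0 else 1)).map
              (fun j => (freeT k rest.length (mask ||| (1 <<< j))).1)).sum
          + (pureF k rest true true (mask ||| (1 <<< d))).1,
         (((if s0 = true then ((0 : Int), (0 : Int)) else skipT k rest.length).2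
            + ((List.range' (if s0 = true then 0 else 1) (d - if s0 = true then 0 else 1)).map
                (fun j => (freeT k rest.length (mask ||| (1 <<< j))).2
                  + (freeT k rest.length (mask ||| (1 <<< j))).1 * (j : Int) * pow10 rest.length)).sum) % pvMOD
           + (pureF k rest true true (mask ||| (1 <<< d))).2
           + (pureF k rest true true (mask ||| (1 <<< d))).1 * (d : Int) * pow10 rest.length) % pvMOD) := by
  have hred : (if s0 = true then ((0 : Int), (0 : Int)) else skipT k rest.length).2 % pvMOD
      = (if s0 = true then ((0 : Int), (0 : Int)) else skipT k rest.length).2 := by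
    cases s0
    · simpa using skipT_snd_reduced k rest.length
    · simp
  conv_lhs => rw [pureF]
  simp only [if_true, pureF_skip]
  have hsplit : d + 1 - (if s0 = true then 0 else 1) = (d - (if s0 = true then 0 else 1)) + 1 := by
    omega
  rw [hsplit, List.range'_1_concat]
  have hlast : (if s0 = true then 0 else 1) + (d - (if s0 = true then 0 else 1)) = d := by omega
  rw [hlast, List.foldl_append, List.foldl_cons, List.foldl_nil]
  rw [PySem.List.foldl_congr_mem _ _
    (fun (r : Int × Int) (j : Nat) =>
      (r.1 + (freeT k rest.length (mask ||| (1 <<< j))).1,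
       PySem.Int.mod (r.2 + (freeT k rest.length (mask ||| (1 <<< j))).2
         + (freeT k rest.length (mask ||| (1 <<< j))).1 * (j : Int) * pow10 rest.length) pvMOD)) _
    (by
      intro acc j hj
      rw [List.mem_range'_1] at hj
      have hjd : (j == d) = false := by
        rw [beq_eq_false_iff_ne]
        omega
      rw [hjd]
      simp only [Bool.and_false, pureF_free])]
  rw [afold_freeT k rest.length mask (pow10 rest.length) _ _ hred]
  have hdd : (d == d) = true := beq_self_eq_true d
  rw [hdd]
  simp only [Bool.and_true, pvmod_eq]

theorem emod_add_mid (x y z : Int) :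
    (x + y % pvMOD + z) % pvMOD = (x + y + z) % pvMOD := by
  have h1 : x + y % pvMOD + z = y % pvMOD + (x + z) := by ring
  have h2 : x + y + z = y + (x + z) := by ring
  rw [h1, h2, emod_addl]

theorem final_alg (ans0' ans r1 r2 s1 s2 F1 F2 P T dd : Int)
    (h : ans0' % pvMOD = (ans + r2) % pvMOD) (hz : r1 * P = 0) :
    ((ans0' + (s2 + s1 * P)) % pvMOD + F2 + F1 * (P + dd * T)) % pvMOD
      = (ans + ((r2 + s2) % pvMOD + F2 + F1 * dd * T) % pvMOD + (r1 + s1 + F1) * P) % pvMOD := by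
  rw [← emod_addl ans0', h, emod_addl]
  rw [show (ans + r2 + (s2 + s1 * P)) % pvMOD + F2 + F1 * (P + dd * T)
      = (ans + r2 + (s2 + s1 * P)) % pvMOD + (F2 + F1 * (P + dd * T)) from by ring, emod_addl]
  rw [show (r2 + s2) % pvMOD + F2 + F1 * dd * T
      = (r2 + s2) % pvMOD + (F2 + F1 * dd * T) from by ring, emod_addl]
  rw [emod_add_mid]
  congr 1
  linear_combination -hz

theorem bWalk_spec (k : Int) (m : Nat)
    (hskip : ∀ L, L ≤ m → (bBuild k m).2.1.getD L (0, 0) = skipT k L)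
    (hfree : ∀ L, L ≤ m → ∀ mask, mask < 1024 →
      ((bBuild k m).1.getD L #[]).getD mask (0, 0) = freeT k L mask) :
    ∀ rem : List Nat, (∀ x ∈ rem, x ≤ 9) → rem.length ≤ m →
    ∀ (s0 : Bool) (mask : Nat) (P ans : Int), mask < 1024 → ans % pvMOD = ans →
      (s0 = false → P = 0) →
      bWalk k (bBuild k m).1 (bBuild k m).2.1 rem (pow10 rem.length) s0 mask P ans
        = (ans + (pureF k rem s0 true mask).2 + (pureF k rem s0 true mask).1 * P) % pvMOD := by
  intro rem
  induction rem with
  | nil =>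
    intro _ _ s0 mask P ans _ hans _
    simp only [bWalk]
    conv_rhs => rw [pureF]
    by_cases hc : (PySem.Int.bitCount ((mask : Nat) : Int) : Int) ≤ k
    · rw [if_pos hc, if_pos hc, pvmod_eq]
      congr 1
      ring
    · rw [if_neg hc, if_neg hc]
      rw [show ans + (0 : Int) + (0 : Int) * P = ans from by ring]
      exact hans.symm
  | cons d rest ih =>
    intro hle9 hlen s0 mask P ans hm hans hP
    have hd9 : d ≤ 9 := hle9 d (by simp)
    have hrest9 : ∀ x ∈ rest, x ≤ 9 := fun x hx => hle9 x (by simp [hx])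
    have hlen' : rest.length ≤ m := by simp only [List.length_cons] at hlen; omega
    have hmask' : mask ||| (1 <<< d) < 1024 := or_lt_1024 hm (by omega)
    have ht' : PySem.Int.floordiv (pow10 (rest.length + 1)) 10 = pow10 rest.length := by
      rw [PySem.Int.floordiv_eq_ediv_of_pos (by norm_num)]
      show (10 * pow10 rest.length) / 10 = _
      exact Int.mul_ediv_cancel_left _ (by norm_num)
    cases s0 with
    | true =>
      simp only [bWalk, reduceIte, List.length_cons]
      rw [ht']
      rw [PySem.List.foldl_congr_mem _ _
        (fun (acc : Int) (j : Nat) =>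
          PySem.Int.mod (acc + (freeT k rest.length (mask ||| (1 <<< j))).2
            + (freeT k rest.length (mask ||| (1 <<< j))).1
              * (PySem.Int.mod ((j : Int) * pow10 rest.length + P) pvMOD)) pvMOD) _
        (by
          intro acc j hj
          rw [List.mem_range'_1] at hj
          rw [hfree rest.length hlen' _ (or_lt_1024 hm (by omega))])]
      rw [bfold_freeT k rest.length mask (pow10 rest.length) P _ _ hans]
      rw [ih hrest9 hlen' true (mask ||| (1 <<< d)) (P + (d : Int) * pow10 rest.length) _
        hmask' (emod_reduced _) (by simp)]
      rw [pureF_limit_split k d rest true mask (by simp)]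
      simp only [reduceIte, Nat.sub_zero]
      rw [sum_split (List.range' 0 d)
        (fun j => (freeT k rest.length (mask ||| (1 <<< j))).2)
        (fun j => (freeT k rest.length (mask ||| (1 <<< j))).1) (pow10 rest.length) P]
      exact final_alg _ _ _ _ _ _ _ _ _ _ _ (by rw [add_zero]) (zero_mul P)
    | false =>
      have hP0 : P = 0 := hP rfl
      subst hP0
      by_cases hd0 : d = 0
      · subst hd0
        have hpf : pureF k (0 :: rest) false true mask = skipT k rest.length := by
          conv_lhs => rw [pureF]
          simp [pureF_skip]
        simp only [bWalk, List.length_cons, Bool.false_eq_true, if_false]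
        rw [ht', hskip rest.length hlen']
        rw [if_pos (by norm_num : (0 : Nat) < 1)]
        simp only [show (0 : Nat) - 1 = 0 from rfl, List.range'_zero, List.foldl_nil, pvmod_eq]
        rw [hpf]
        congr 1
        ring
      · simp only [bWalk, List.length_cons, Bool.false_eq_true, if_false]
        rw [ht', hskip rest.length hlen']
        rw [PySem.List.foldl_congr_mem _ _
          (fun (acc : Int) (j : Nat) =>
            PySem.Int.mod (acc + (freeT k rest.length (mask ||| (1 <<< j))).2
              + (freeT k rest.length (mask ||| (1 <<< j))).1
                * (PySem.Int.mod ((j : Int) * pow10 rest.length + 0) pvMOD)) pvMOD) _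
          (by
            intro acc j hj
            rw [List.mem_range'_1] at hj
            rw [hfree rest.length hlen' _ (or_lt_1024 hm (by omega))])]
        rw [if_neg (by omega : ¬ d < 1)]
        rw [bfold_freeT k rest.length mask (pow10 rest.length) 0 _ _
          (by rw [pvmod_eq]; exact emod_reduced _)]
        rw [ih hrest9 hlen' true (mask ||| (1 <<< d)) (0 + (d : Int) * pow10 rest.length) _
          hmask' (emod_reduced _) (by simp)]
        rw [pureF_limit_split k d rest false mask (by simp; omega)]
        simp only [Bool.false_eq_true, if_false]
        rw [sum_split (List.range' 1 (d - 1))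
          (fun j => (freeT k rest.length (mask ||| (1 <<< j))).2)
          (fun j => (freeT k rest.length (mask ||| (1 <<< j))).1) (pow10 rest.length) 0]
        rw [pvmod_eq (ans + (skipT k rest.length).2)]
        exact final_alg _ _ _ _ _ _ _ _ _ _ _ (emod_reduced _) (mul_zero _)

theorem digit_le_9 {c : Char} (h : c.isDigit = true) : c.toNat - 48 ≤ 9 := by
  simp [Char.isDigit] at h
  obtain ⟨h1, h2⟩ := h
  have h2' : c.val.toNat ≤ (57 : UInt32).toNat := by exact_mod_cast h2
  have e1 : (57 : UInt32).toNat = 57 := rfl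
  have e2 : c.toNat = c.val.toNat := rfl
  omega

theorem check_spec_main (R k : Int) (hR : 0 ≤ R) : check R k = check_alt R k := by
  have hdig : ∀ x ∈ (PySem.Int.toChars R).map (fun c => c.toNat - 48), x ≤ 9 := by
    intro x hx
    obtain ⟨c, hc, rfl⟩ := List.mem_map.mp hx
    have hchars : c ∈ Nat.toDigits 10 R.toNat := by
      have he : PySem.Int.toChars R = Nat.toDigits 10 R.toNat := by
        unfold PySem.Int.toChars
        rw [if_neg (by omega)]
      rwa [he] at hc
    exact digit_le_9 (Nat.isDigit_of_mem_toDigits (by norm_num) (by norm_num) hchars)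
  obtain ⟨hs1, hs2, ht, hskip, hfree⟩ :=
    bBuild_spec k ((PySem.Int.toChars R).map (fun c => c.toNat - 48)).length
  rw [check_eq_pure]
  show _ = bWalk k (bBuild k ((PySem.Int.toChars R).map (fun c => c.toNat - 48)).length).1
      (bBuild k ((PySem.Int.toChars R).map (fun c => c.toNat - 48)).length).2.1
      ((PySem.Int.toChars R).map (fun c => c.toNat - 48))
      (bBuild k ((PySem.Int.toChars R).map (fun c => c.toNat - 48)).length).2.2 false 0 0 0
  rw [ht]
  rw [bWalk_spec k _ hskip hfree _ hdig le_rfl false 0 0 0 (by norm_num)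
    (Int.zero_emod _) (fun _ => rfl)]
  rw [show (0 : Int)
        + (pureF k ((PySem.Int.toChars R).map (fun c => c.toNat - 48)) false true 0).2
        + (pureF k ((PySem.Int.toChars R).map (fun c => c.toNat - 48)) false true 0).1 * 0
      = (pureF k ((PySem.Int.toChars R).map (fun c => c.toNat - 48)) false true 0).2
      from by ring]
  exact (pureF_snd_reduced k _ false true 0).symm

-- ===== VERDICT (by name: the statement is the Claim_ definition above) =====
theorem check_spec : Claim_equal_check := by
  intro R k _ hpre
  unfold Spec_check
  exact check_spec_main R k hpre
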